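-- pv_equiv track=rewrite | github.com/BoiPlex/CS50 | sentimental-credit/credit.py | valid_card_num
-- ===== SOURCE A (Python) =====
-- def valid_card_num(num):
--     sum = 0
--     # num as a string
--     n = str(num)
--     # Tracks every first and secnod digit
--     tracker = 0
--
--     # Iterate through every digit
--     for i in reversed(n):
--         digit = int(i)
--         if tracker % 2 != 0:
--             product = digit * 2
--             # If product is 2 digits or not
--             sum += product % 10 + int(product / 10)
--         else:
--             sum += digit
--
--         tracker += 1
--
--     return sum % 10 == 0
-- ===== SOURCE B (Python) =====
-- def valid_card_num(num):
--     # Consume the reversed digit list two at a time: plain digit, then doubled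
--     # digit with the classic subtract-9 rule; no parity counter needed.
--     r = [int(c) for c in reversed(str(num))]
--     total = 0
--     while r:
--         total += r[0]
--         if len(r) > 1:
--             d = r[1] * 2
--             total += d - 9 if d > 9 else d
--         r = r[2:]
--     return total % 10 == 0
-- ===== Notes on version B (the rewrite author's own statement) =====
-- stated objective: alternative
-- what changed: B replaces A's single loop with a parity counter and the %10 + /10 digit-split by a materialised reversed digit list consumed two digits per step with the subtract-9 doubling rule, so no parity state and no div/mod splitting remain.
import Mathlib
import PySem

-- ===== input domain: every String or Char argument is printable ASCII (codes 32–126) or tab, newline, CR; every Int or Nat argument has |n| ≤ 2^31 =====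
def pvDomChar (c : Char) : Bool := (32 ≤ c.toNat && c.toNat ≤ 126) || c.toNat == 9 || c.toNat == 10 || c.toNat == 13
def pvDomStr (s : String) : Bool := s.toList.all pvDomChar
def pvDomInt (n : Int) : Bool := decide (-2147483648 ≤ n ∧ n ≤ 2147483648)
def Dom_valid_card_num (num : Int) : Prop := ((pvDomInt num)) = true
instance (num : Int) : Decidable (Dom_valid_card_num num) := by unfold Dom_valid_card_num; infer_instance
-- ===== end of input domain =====

-- B drops A's parity counter and %10 + /10 digit split: it materialises the reversed
-- digit list and consumes it two digits per step with the subtract-9 doubling rule.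

-- ===== PORT A =====
-- int(i) on a one-character string
def vcDigit? (c : Char) : Option Int := PySem.Int.ofChars? [c]

-- A's loop: for i in reversed(n) with accumulator sum and parity counter tracker;
-- none = a ValueError from int(i).  int(product / 10) truncates toward zero, which
-- for the nonnegative products int() produces here equals floor division.
def vcLoopA : List Char → Int → Int → Option Int
  | [], _, s => some s
  | c :: rest, tracker, s =>
      match vcDigit? c with
      | none => none
      | some digit =>
          if PySem.Int.mod tracker 2 ≠ 0 then
            vcLoopA rest (tracker + 1)
              (s + (PySem.Int.mod (digit * 2) 10 + PySem.Int.floordiv (digit * 2) 10))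
          else
            vcLoopA rest (tracker + 1) (s + digit)

def valid_card_num (num : Int) : Bool :=
  match vcLoopA (PySem.Int.toChars num).reverse 0 0 with
  | some s => decide (PySem.Int.mod s 10 = 0)
  | none => false          -- unreachable under Pre_: Python A raises ValueError here

-- ===== PORT B =====
-- [int(c) for c in reversed(str(num))]; none = a ValueError
def vcDigits? : List Char → Option (List Int)
  | [] => some []
  | c :: rest =>
      match vcDigit? c with
      | none => none
      | some d =>
          match vcDigits? rest with
          | none => none
          | some ds => some (d :: ds)

-- B's while loop: add r[0], add the doubled r[1] (minus 9 if > 9), then r = r[2:]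
def vcLoopB : List Int → Int
  | [] => 0
  | [d] => d
  | d :: e :: rest =>
      (d + (if e * 2 > 9 then e * 2 - 9 else e * 2)) + vcLoopB rest

def valid_card_num_alt (num : Int) : Bool :=
  match vcDigits? (PySem.Int.toChars num).reverse with
  | some r => decide (PySem.Int.mod (vcLoopB r) 10 = 0)
  | none => false          -- unreachable under Pre_: Python B raises ValueError here

-- ===== PRECONDITION & SPEC =====
-- Python A raises ValueError on num < 0 (int('-') on the sign character), so Pre_
-- admits exactly the nonnegative inputs, on all of which A returns normally.
def Pre_valid_card_num (num : Int) : Prop := 0 ≤ num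
instance (num : Int) : Decidable (Pre_valid_card_num num) := by unfold Pre_valid_card_num; infer_instance

def pvWitness_valid_card_num : Int := 1876543210

def Spec_valid_card_num (num : Int) (out : Bool) : Prop := out = valid_card_num_alt num
instance (num : Int) (out : Bool) : Decidable (Spec_valid_card_num num out) := by unfold Spec_valid_card_num; infer_instance

-- ===== CLAIM (what is proved, stated in full; the proofs are below) =====
def Claim_equal_valid_card_num : Prop := ∀ (num : Int), Dom_valid_card_num num → Pre_valid_card_num num → Spec_valid_card_num num (valid_card_num num)

-- ===== LEMMAS AND PROOFS =====

def vcIsDig (c : Char) : Prop := c ∈ ['0','1','2','3','4','5','6','7','8','9']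

theorem vcDigitChar_isDig (m : Nat) (h : m < 10) : vcIsDig (Nat.digitChar m) := by
  unfold vcIsDig
  interval_cases m <;> decide

theorem vcToDigitsCore_isDig (f : Nat) : ∀ (n : Nat) (acc : List Char),
    (∀ c ∈ acc, vcIsDig c) → ∀ c ∈ Nat.toDigitsCore 10 f n acc, vcIsDig c := by
  induction f with
  | zero => intro n acc hacc; simpa [Nat.toDigitsCore] using hacc
  | succ f ih =>
      intro n acc hacc c hc
      simp only [Nat.toDigitsCore] at hc
      split at hc
      · rcases List.mem_cons.mp hc with h | h
        · subst h; exact vcDigitChar_isDig _ (Nat.mod_lt _ (by omega))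
        · exact hacc _ h
      · refine ih _ _ ?_ _ hc
        intro d hd
        rcases List.mem_cons.mp hd with h | h
        · subst h; exact vcDigitChar_isDig _ (Nat.mod_lt _ (by omega))
        · exact hacc _ h

theorem vcToChars_isDig (num : Int) (h : 0 ≤ num) :
    ∀ c ∈ PySem.Int.toChars num, vcIsDig c := by
  intro c hc
  unfold PySem.Int.toChars at hc
  rw [if_neg (by omega)] at hc
  exact vcToDigitsCore_isDig _ _ _ (by simp) _ hc

theorem vcDigit?_of_isDig (c : Char) (h : vcIsDig c) :
    vcDigit? c = some ((c.toNat : Int) - 48) ∧ 0 ≤ (c.toNat : Int) - 48 ∧ (c.toNat : Int) - 48 ≤ 9 := by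
  simp only [vcIsDig] at h
  fin_cases h <;> exact ⟨by decide, by decide, by decide⟩

theorem vcTransform_eq (d : Int) (h0 : 0 ≤ d) (h9 : d ≤ 9) :
    PySem.Int.mod (d * 2) 10 + PySem.Int.floordiv (d * 2) 10
      = (if d * 2 > 9 then d * 2 - 9 else d * 2) := by
  interval_cases d <;> decide

theorem vcMod2_succ_succ (t : Int) : PySem.Int.mod (t + 1 + 1) 2 = PySem.Int.mod t 2 := by
  simp [PySem.Int.mod, Int.fmod_eq_emod]
  omega

theorem vcMod2_succ_ne (t : Int) (h : PySem.Int.mod t 2 = 0) :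
    PySem.Int.mod (t + 1) 2 ≠ 0 := by
  simp [PySem.Int.mod, Int.fmod_eq_emod] at *
  omega

-- main correspondence: on a list of digit characters and an even tracker,
-- A's loop returns s plus B's pairwise sum of the digit values
theorem vcLoopA_eq_loopB (l : List Char) (hd : ∀ c ∈ l, vcIsDig c)
    (t s : Int) (ht : PySem.Int.mod t 2 = 0) :
    vcLoopA l t s = (vcDigits? l).map (fun r => s + vcLoopB r) := by
  match l with
  | [] => simp [vcLoopA, vcDigits?, vcLoopB]
  | [c] =>
      obtain ⟨he, _, _⟩ := vcDigit?_of_isDig c (hd c (by simp))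
      simp only [vcLoopA, vcDigits?, he]
      rw [if_neg (not_ne_iff.mpr ht)]
      simp [vcLoopA, vcLoopB]
  | c :: e :: rest =>
      obtain ⟨hec, h0c, h9c⟩ := vcDigit?_of_isDig c (hd c (by simp))
      obtain ⟨hee, h0e, h9e⟩ := vcDigit?_of_isDig e (hd e (by simp))
      have hrest := vcLoopA_eq_loopB rest (fun d hdm => hd d (by simp [hdm]))
        (t + 1 + 1) (s + ((c.toNat : Int) - 48)
          + (PySem.Int.mod (((e.toNat : Int) - 48) * 2) 10
             + PySem.Int.floordiv (((e.toNat : Int) - 48) * 2) 10))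
        (by rw [vcMod2_succ_succ]; exact ht)
      simp only [vcLoopA, hec, hee, ht, if_neg (by simp : ¬ ((0:Int) ≠ 0)),
        if_pos (vcMod2_succ_ne t ht)] at hrest ⊢
      rw [hrest]
      have htr := vcTransform_eq ((e.toNat : Int) - 48) h0e h9e
      cases hres : vcDigits? rest with
      | none => simp [vcDigits?, hec, hee, hres]
      | some ds =>
          simp only [vcDigits?, hec, hee, hres, vcLoopB, Option.map_some]
          rw [htr]
          ring
termination_by l.length

theorem valid_card_num_spec : Claim_equal_valid_card_num := by
  intro num _ hpre
  unfold Spec_valid_card_num valid_card_num valid_card_num_alt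
  have hdig : ∀ c ∈ (PySem.Int.toChars num).reverse, vcIsDig c := by
    intro c hc; exact vcToChars_isDig num hpre c (List.mem_reverse.mp hc)
  rw [vcLoopA_eq_loopB _ hdig 0 0 (by decide)]
  cases h : vcDigits? (PySem.Int.toChars num).reverse with
  | none => simp
  | some r => simp
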